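-- pv_equiv track=rewrite | github.com/ProperoIQ/shreyas-automation-backend | functions/age_summary.py | clean_sheet_name
-- ===== SOURCE A (Python) =====
-- def clean_sheet_name(name):
--     """Clean sheet name to be Excel-compatible and hyperlink-safe"""
--     replacements = {
--         '>=': '_ge_',
--         '<=': '_le_',
--         '>': '_gt_',
--         '<': '_lt_',
--         '=': '_eq_',
--         ':': '', '\\': '', '/': '', '?': '', '*': '', '[': '', ']': ''
--     }
--     for k, v in replacements.items():
--         name = name.replace(k, v)
--     return name[:31]  # Excel sheet name limit
-- ===== SOURCE B (Python) =====
-- def clean_sheet_name(name):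
--     """Clean sheet name to be Excel-compatible and hyperlink-safe (single left-to-right scan)."""
--     out = []
--     i = 0
--     n = len(name)
--     while i < n:
--         c = name[i]
--         if c in '><' and i + 1 < n and name[i + 1] == '=':
--             out.append('_ge_' if c == '>' else '_le_')
--             i += 2
--         elif c == '>':
--             out.append('_gt_')
--             i += 1
--         elif c == '<':
--             out.append('_lt_')
--             i += 1
--         elif c == '=':
--             out.append('_eq_')
--             i += 1
--         elif c in ':\\/?*[]':
--             i += 1
--         else:
--             out.append(c)
--             i += 1
--     return ''.join(out)[:31]
-- ===== Notes on version B (the rewrite author's own statement) =====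
-- stated objective: alternative
-- what changed: Replaced A's twelve sequential full-string replace passes with a single left-to-right scan that matches the two-character tokens first and maps each character once; asymptotically one pass instead of twelve, though CPython's C-level str.replace makes A faster in wall-clock terms.
import Mathlib
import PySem

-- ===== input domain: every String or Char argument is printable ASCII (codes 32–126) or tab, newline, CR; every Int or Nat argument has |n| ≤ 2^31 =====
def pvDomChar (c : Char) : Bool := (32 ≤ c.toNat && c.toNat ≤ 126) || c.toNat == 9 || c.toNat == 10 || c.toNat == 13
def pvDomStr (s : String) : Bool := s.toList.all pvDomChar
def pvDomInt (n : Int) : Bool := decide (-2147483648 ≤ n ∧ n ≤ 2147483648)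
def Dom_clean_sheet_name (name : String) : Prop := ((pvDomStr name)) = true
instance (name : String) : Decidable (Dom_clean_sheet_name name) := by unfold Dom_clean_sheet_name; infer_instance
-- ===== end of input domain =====

-- B replaces A's twelve sequential full-string replace passes by a single left-to-right scan (objective: alternative, one pass instead of twelve).

-- ===== PORT A =====
def clean_sheet_name (name : String) : String :=
  let replacements : PySem.Dict String String :=
    ((((((((((((PySem.Dict.empty.insert ">=" "_ge_").insert "<=" "_le_").insert ">" "_gt_").insert
      "<" "_lt_").insert "=" "_eq_").insert ":" "").insert "\\" "").insert "/" "").insert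
      "?" "").insert "*" "").insert "[" "").insert "]" "")
  let name := replacements.items.foldl (fun s kv => PySem.Str.replace s kv.1 kv.2) name
  PySem.Str.slice name none (some 31)

-- ===== PORT B =====
-- single-character mapping (B's elif chain)
def pvMapOne (c : Char) : List Char :=
  if c = '>' then ['_','g','t','_']
  else if c = '<' then ['_','l','t','_']
  else if c = '=' then ['_','e','q','_']
  else if c = ':' ∨ c = '\\' ∨ c = '/' ∨ c = '?' ∨ c = '*' ∨ c = '[' ∨ c = ']' then []
  else [c]

-- B's while-loop: one scan, two-character tokens first
def pvScan : List Char → List Char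
  | [] => []
  | [c] => pvMapOne c
  | c1 :: c2 :: t =>
    if (c1 = '>' ∨ c1 = '<') ∧ c2 = '=' then
      (if c1 = '>' then ['_','g','e','_'] else ['_','l','e','_']) ++ pvScan t
    else pvMapOne c1 ++ pvScan (c2 :: t)

def clean_sheet_name_alt (name : String) : String :=
  String.ofList ((pvScan name.toList).take 31)

-- ===== PRECONDITION & SPEC =====
def Spec_clean_sheet_name (name : String) (out : String) : Prop := out = clean_sheet_name_alt name
instance (name : String) (out : String) : Decidable (Spec_clean_sheet_name name out) := by unfold Spec_clean_sheet_name; infer_instance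

-- ===== CLAIM (what is proved, stated in full; the proofs are below) =====
def Claim_equal_clean_sheet_name : Prop := ∀ (name : String), Dom_clean_sheet_name name → Spec_clean_sheet_name name (clean_sheet_name name)

-- ===== LEMMAS AND PROOFS =====

-- a clean structural recursion equal to PySem.Chars.replace for a nonempty pattern
def repF (old new : List Char) : List Char → List Char
  | [] => []
  | c :: t =>
    if old.isPrefixOf (c :: t) then new ++ repF old new (t.drop (old.length - 1))
    else c :: repF old new t
termination_by l => l.length
decreasing_by
  · simpa using Nat.lt_succ_of_le (List.length_drop (l := t) (i := old.length - 1) ▸ Nat.sub_le _ _)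
  · simp

lemma repF_nil (old new : List Char) : repF old new [] = [] := by simp [repF]

lemma repF_skip (old new : List Char) (c : Char) (hne : old ≠ []) (hc : old.head? ≠ some c)
    (x : List Char) : repF old new (c :: x) = c :: repF old new x := by
  obtain ⟨o1, ot, rfl⟩ : ∃ o1 ot, old = o1 :: ot := by
    cases old with
    | nil => exact absurd rfl hne
    | cons a b => exact ⟨a, b, rfl⟩
  rw [repF]
  simp only [List.head?_cons, ne_eq, Option.some.injEq] at hc
  simp [List.isPrefixOf, hc]

lemma repF_hit1 (c : Char) (new x : List Char) : repF [c] new (c :: x) = new ++ repF [c] new x := by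
  rw [repF]; simp [List.isPrefixOf]

lemma repF_hit2 (c1 c2 : Char) (new x : List Char) :
    repF [c1, c2] new (c1 :: c2 :: x) = new ++ repF [c1, c2] new x := by
  rw [repF]; simp [List.isPrefixOf]

lemma repF_miss2 (c1 c2 c2' : Char) (new x : List Char) (h : c2' ≠ c2) :
    repF [c1, c2] new (c1 :: c2' :: x) = c1 :: repF [c1, c2] new (c2' :: x) := by
  rw [repF]; simp [List.isPrefixOf, Ne.symm h]

lemma repF_single2 (c1 c2 : Char) (new : List Char) : repF [c1, c2] new [c1] = [c1] := by
  rw [repF]; simp [List.isPrefixOf, repF_nil]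

lemma repF_miss2' (c1 c2 : Char) (new x : List Char) (h : x.head? ≠ some c2) :
    repF [c1, c2] new (c1 :: x) = c1 :: repF [c1, c2] new x := by
  cases x with
  | nil => rw [repF_single2, repF_nil]
  | cons a t =>
    simp only [List.head?_cons, ne_eq, Option.some.injEq] at h
    exact repF_miss2 c1 c2 a new t h

lemma head_ne_ge (c2 : Char) (t : List Char) (h : c2 ≠ '=') :
    (repF ['>','='] ['_','g','e','_'] (c2 :: t)).head? ≠ some '=' := by
  rw [repF]
  split
  · simp
  · simp [h]

lemma go_eq_repF (old new : List Char) (hne : old ≠ []) :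
    ∀ (fuel : Nat) (l acc : List Char), l.length ≤ fuel →
      PySem.Chars.replace.go old new fuel l acc = acc.reverse ++ repF old new l := by
  intro fuel
  induction fuel with
  | zero =>
    intro l acc h
    have hl : l = [] := by cases l <;> simp_all
    subst hl
    simp [PySem.Chars.replace.go, repF_nil]
  | succ n ih =>
    intro l acc h
    cases l with
    | nil => simp [PySem.Chars.replace.go, repF_nil]
    | cons c t =>
      obtain ⟨o1, ot, rfl⟩ : ∃ o1 ot, old = o1 :: ot := by
        cases old with
        | nil => exact absurd rfl hne
        | cons a b => exact ⟨a, b, rfl⟩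
      rw [PySem.Chars.replace.go]
      by_cases hp : (o1 :: ot).isPrefixOf (c :: t)
      · simp only [hp, if_true]
        have hlen : (List.drop (o1 :: ot).length (c :: t)).length ≤ n := by
          simp only [List.length_drop, List.length_cons] at *
          omega
        rw [ih _ _ hlen, repF]
        simp only [hp, if_true]
        have hd : List.drop (o1 :: ot).length (c :: t) = t.drop ((o1 :: ot).length - 1) := by
          simp
        rw [hd]
        simp
      · simp only [hp, if_false]
        have hlen : t.length ≤ n := by simp at h; omega
        rw [ih _ _ hlen, repF]
        simp [hp]

lemma replace_eq_repF (old new s : List Char) (hne : old ≠ []) :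
    PySem.Chars.replace s old new = repF old new s := by
  have h : ¬ old.isEmpty := by simpa [List.isEmpty_iff] using hne
  simp [PySem.Chars.replace, h, go_eq_repF old new hne s.length s [] le_rfl]

-- A's twelve rules, in dict-insertion order
def pvRules : List (List Char × List Char) :=
  [(['>','='], ['_','g','e','_']), (['<','='], ['_','l','e','_']),
   (['>'], ['_','g','t','_']), (['<'], ['_','l','t','_']), (['='], ['_','e','q','_']),
   ([':'], []), (['\\'], []), (['/'], []), (['?'], []), (['*'], []), (['['], []), ([']'], [])]

def applyAll (rules : List (List Char × List Char)) (l : List Char) : List Char :=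
  rules.foldl (fun s r => repF r.1 r.2 s) l

lemma applyAll_cons (r : List Char × List Char) (rs : List (List Char × List Char)) (l : List Char) :
    applyAll (r :: rs) l = applyAll rs (repF r.1 r.2 l) := rfl

lemma applyAll_nil (l : List Char) : applyAll [] l = l := rfl

lemma applyAll_nil_input : ∀ rules, applyAll rules [] = [] := by
  intro rules
  induction rules with
  | nil => rfl
  | cons r rs ih => simpa [applyAll, repF_nil] using ih

-- one scan step of the chain: the two-character tokens
lemma step_ge (t : List Char) :
    applyAll pvRules ('>' :: '=' :: t) = ['_','g','e','_'] ++ applyAll pvRules t := by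
  simp only [pvRules, applyAll_cons, applyAll_nil]
  simp [repF_skip, repF_hit1, repF_hit2, repF_miss2, repF_single2, repF_nil]

lemma step_le (t : List Char) :
    applyAll pvRules ('<' :: '=' :: t) = ['_','l','e','_'] ++ applyAll pvRules t := by
  simp only [pvRules, applyAll_cons, applyAll_nil]
  simp [repF_skip, repF_hit1, repF_hit2, repF_miss2, repF_single2, repF_nil]

-- '>' / '<' not followed by '='
lemma step_gt (c2 : Char) (t : List Char) (h : c2 ≠ '=') :
    applyAll pvRules ('>' :: c2 :: t) = ['_','g','t','_'] ++ applyAll pvRules (c2 :: t) := by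
  simp only [pvRules, applyAll_cons, applyAll_nil]
  simp [repF_skip, repF_hit1, repF_hit2, repF_miss2 _ _ _ _ _ h, repF_single2, repF_nil]

lemma step_lt (c2 : Char) (t : List Char) (h : c2 ≠ '=') :
    applyAll pvRules ('<' :: c2 :: t) = ['_','l','t','_'] ++ applyAll pvRules (c2 :: t) := by
  simp only [pvRules, applyAll_cons, applyAll_nil]
  rw [repF_skip ['>','='] ['_','g','e','_'] '<' (by simp) (by simp),
      repF_miss2' '<' '=' ['_','l','e','_'] _ (head_ne_ge c2 t h)]
  simp [repF_skip, repF_hit1, repF_hit2, repF_single2, repF_nil]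

lemma step_gt1 : applyAll pvRules ['>'] = ['_','g','t','_'] := by
  simp only [pvRules, applyAll_cons, applyAll_nil]
  simp [repF_skip, repF_hit1, repF_hit2, repF_miss2, repF_single2, repF_nil]

lemma step_lt1 : applyAll pvRules ['<'] = ['_','l','t','_'] := by
  simp only [pvRules, applyAll_cons, applyAll_nil]
  simp [repF_skip, repF_hit1, repF_hit2, repF_miss2, repF_single2, repF_nil]

-- a head that is not '>' or '<' behaves the same with any tail
lemma step_one (c : Char) (r : List Char) (hgt : c ≠ '>') (hlt : c ≠ '<') :
    applyAll pvRules (c :: r) = pvMapOne c ++ applyAll pvRules r := by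
  by_cases h1 : c = '='
  · subst h1
    simp only [pvRules, applyAll_cons, applyAll_nil]
    simp [repF_skip, repF_hit1, repF_hit2, repF_miss2, repF_single2, repF_nil, pvMapOne]
  by_cases h2 : c = ':'
  · subst h2
    simp only [pvRules, applyAll_cons, applyAll_nil]
    simp [repF_skip, repF_hit1, repF_hit2, repF_miss2, repF_single2, repF_nil, pvMapOne]
  by_cases h3 : c = '\\'
  · subst h3
    simp only [pvRules, applyAll_cons, applyAll_nil]
    simp [repF_skip, repF_hit1, repF_hit2, repF_miss2, repF_single2, repF_nil, pvMapOne]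
  by_cases h4 : c = '/'
  · subst h4
    simp only [pvRules, applyAll_cons, applyAll_nil]
    simp [repF_skip, repF_hit1, repF_hit2, repF_miss2, repF_single2, repF_nil, pvMapOne]
  by_cases h5 : c = '?'
  · subst h5
    simp only [pvRules, applyAll_cons, applyAll_nil]
    simp [repF_skip, repF_hit1, repF_hit2, repF_miss2, repF_single2, repF_nil, pvMapOne]
  by_cases h6 : c = '*'
  · subst h6
    simp only [pvRules, applyAll_cons, applyAll_nil]
    simp [repF_skip, repF_hit1, repF_hit2, repF_miss2, repF_single2, repF_nil, pvMapOne]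
  by_cases h7 : c = '['
  · subst h7
    simp only [pvRules, applyAll_cons, applyAll_nil]
    simp [repF_skip, repF_hit1, repF_hit2, repF_miss2, repF_single2, repF_nil, pvMapOne]
  by_cases h8 : c = ']'
  · subst h8
    simp only [pvRules, applyAll_cons, applyAll_nil]
    simp [repF_skip, repF_hit1, repF_hit2, repF_miss2, repF_single2, repF_nil, pvMapOne]
  · simp only [pvRules, applyAll_cons, applyAll_nil]
    simp [repF_skip, repF_hit1, repF_hit2, repF_miss2, repF_single2, repF_nil,
      pvMapOne, h1, h2, h3, h4, h5, h6, h7, h8, hgt, hlt,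
      Ne.symm hgt, Ne.symm hlt, Ne.symm h1, Ne.symm h2, Ne.symm h3, Ne.symm h4,
      Ne.symm h5, Ne.symm h6, Ne.symm h7, Ne.symm h8]

lemma ofList_slice31 (s : String) (L : List Char) (h : s.toList = L) :
    PySem.Str.slice s none (some 31) = String.ofList (L.take 31) := by
  subst h
  rw [← String.ofList_toList (s := PySem.Str.slice s none (some 31))]
  congr 1
  rw [PySem.Str.toList_slice]
  simp only [PySem.Chars.slice_eq_listSlice]
  rw [PySem.List.slice_to _ (by norm_num)]
  rw [show Int.toNat 31 = 31 from rfl]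

lemma chain_eq_scan (l : List Char) : applyAll pvRules l = pvScan l := by
  generalize hn : l.length = n
  induction n using Nat.strong_induction_on generalizing l with
  | _ n ih =>
    cases l with
    | nil => simp [applyAll_nil_input, pvScan]
    | cons c1 r =>
      cases r with
      | nil =>
        by_cases h1 : c1 = '>'
        · subst h1; rw [step_gt1]; simp [pvScan, pvMapOne]
        by_cases h2 : c1 = '<'
        · subst h2; rw [step_lt1]; simp [pvScan, pvMapOne]
        · rw [step_one c1 [] h1 h2, applyAll_nil_input]
          simp [pvScan]
      | cons c2 t =>
        have hlt : t.length < n := by simp only [List.length_cons] at hn; omega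
        have hct : (c2 :: t).length < n := by simp only [List.length_cons] at hn ⊢; omega
        by_cases h1 : c1 = '>'
        · subst h1
          by_cases h2 : c2 = '='
          · subst h2
            rw [step_ge, ih t.length hlt t rfl]
            simp [pvScan]
          · rw [step_gt c2 t h2, ih (c2 :: t).length hct (c2 :: t) rfl]
            simp [pvScan, pvMapOne, h2]
        by_cases h2 : c1 = '<'
        · subst h2
          by_cases h3 : c2 = '='
          · subst h3
            rw [step_le, ih t.length hlt t rfl]
            simp [pvScan]
          · rw [step_lt c2 t h3, ih (c2 :: t).length hct (c2 :: t) rfl]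
            simp [pvScan, pvMapOne, h3]
        · rw [step_one c1 (c2 :: t) h1 h2, ih (c2 :: t).length hct (c2 :: t) rfl]
          simp [pvScan, h1, h2]

-- ===== VERDICT (by name: the statement is the Claim_ definition above) =====
theorem clean_sheet_name_spec : Claim_equal_clean_sheet_name := by
  intro name _
  show clean_sheet_name name = clean_sheet_name_alt name
  simp only [clean_sheet_name, clean_sheet_name_alt]
  have hitems :
      (((((((((((((PySem.Dict.empty.insert ">=" "_ge_").insert "<=" "_le_").insert ">" "_gt_").insert
        "<" "_lt_").insert "=" "_eq_").insert ":" "").insert "\\" "").insert "/" "").insert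
        "?" "").insert "*" "").insert "[" "").insert "]" "") : PySem.Dict String String).items =
      [(">=", "_ge_"), ("<=", "_le_"), (">", "_gt_"), ("<", "_lt_"), ("=", "_eq_"),
       (":", ""), ("\\", ""), ("/", ""), ("?", ""), ("*", ""), ("[", ""), ("]", "")] := by rfl
  rw [hitems]
  simp only [List.foldl_cons, List.foldl_nil]
  have hchain := chain_eq_scan name.toList
  simp only [applyAll, pvRules, List.foldl_cons, List.foldl_nil] at hchain
  apply ofList_slice31
  simp only [PySem.Str.toList_replace]
  simp only [show ((">=" : String).toList) = ['>','='] from rfl,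
    show (("<=" : String).toList) = ['<','='] from rfl,
    show ((">" : String).toList) = ['>'] from rfl,
    show (("<" : String).toList) = ['<'] from rfl,
    show (("=" : String).toList) = ['='] from rfl,
    show ((":" : String).toList) = [':'] from rfl,
    show (("\\" : String).toList) = ['\\'] from rfl,
    show (("/" : String).toList) = ['/'] from rfl,
    show (("?" : String).toList) = ['?'] from rfl,
    show (("*" : String).toList) = ['*'] from rfl,
    show (("[" : String).toList) = ['['] from rfl,
    show (("]" : String).toList) = [']'] from rfl,
    show (("_ge_" : String).toList) = ['_','g','e','_'] from rfl,
    show (("_le_" : String).toList) = ['_','l','e','_'] from rfl,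
    show (("_gt_" : String).toList) = ['_','g','t','_'] from rfl,
    show (("_lt_" : String).toList) = ['_','l','t','_'] from rfl,
    show (("_eq_" : String).toList) = ['_','e','q','_'] from rfl,
    show (("" : String).toList) = [] from rfl]
  rw [replace_eq_repF _ _ _ (by simp), replace_eq_repF _ _ _ (by simp),
      replace_eq_repF _ _ _ (by simp), replace_eq_repF _ _ _ (by simp),
      replace_eq_repF _ _ _ (by simp), replace_eq_repF _ _ _ (by simp),
      replace_eq_repF _ _ _ (by simp), replace_eq_repF _ _ _ (by simp),
      replace_eq_repF _ _ _ (by simp), replace_eq_repF _ _ _ (by simp),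
      replace_eq_repF _ _ _ (by simp), replace_eq_repF _ _ _ (by simp)]
  rw [hchain]
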